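-- pv_equiv track=rewrite | github.com/neeraj6151/code_for_yourself | Concept Basics/Basic Hashing/sum_of_highest_lowest_frequency.py | sumHighestAndLowestFrequency
-- ===== SOURCE A (Python) =====
-- def sumHighestAndLowestFrequency(nums):
--     dict_ = {}
--     for i in nums:
--         if i in dict_:
--             dict_[i] += 1
--         else:
--             dict_[i] = 1
--     res = sorted(list(dict_.values()))
--     return res[0] + res [-1]
-- ===== SOURCE B (Python) =====
-- def sumHighestAndLowestFrequency(nums):
--     counts = []
--     prev = None
--     run = 0
--     for x in sorted(nums):
--         if run and x == prev:
--             run += 1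
--         else:
--             if run:
--                 counts.append(run)
--             run = 1
--             prev = x
--     if run:
--         counts.append(run)
--     counts.sort()
--     return counts[0] + counts[-1]
-- ===== Notes on version B (the rewrite author's own statement) =====
-- stated objective: alternative
-- what changed: Replaces the frequency dict with sorting nums and a single scan that collects the length of each run of equal consecutive elements, then sorts the run lengths and adds first and last.
import Mathlib
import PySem

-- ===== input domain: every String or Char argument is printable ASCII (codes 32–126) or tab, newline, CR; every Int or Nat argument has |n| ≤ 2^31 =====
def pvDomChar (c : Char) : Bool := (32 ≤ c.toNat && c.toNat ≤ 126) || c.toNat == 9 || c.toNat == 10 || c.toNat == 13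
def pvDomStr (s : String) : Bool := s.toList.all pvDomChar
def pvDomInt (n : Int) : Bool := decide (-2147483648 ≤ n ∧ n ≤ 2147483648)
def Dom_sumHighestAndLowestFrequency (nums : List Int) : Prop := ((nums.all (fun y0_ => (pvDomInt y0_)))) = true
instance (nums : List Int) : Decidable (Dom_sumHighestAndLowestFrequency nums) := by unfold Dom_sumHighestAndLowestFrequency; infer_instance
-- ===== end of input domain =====

-- B replaces A's frequency dict with sorting nums and one scan over runs of equal
-- consecutive elements; objective: alternative (same cost, no speed claim).

-- ===== PORT A =====
def sumHighestAndLowestFrequency (nums : List Int) : Int :=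
  let dict_ := nums.foldl
    (fun d i => if d.contains i then d.insert i (d.getD i 0 + 1) else d.insert i 1)
    (PySem.Dict.empty : PySem.Dict Int Int)
  let res := PySem.List.sorted dict_.values (fun x => x) false
  PySem.List.pyGetD res 0 0 + PySem.List.pyGetD res (-1) 0

-- ===== PORT B =====
-- loop body of Source B: state (counts, prev, run)
def pvStepB (st : List Int × Option Int × Int) (x : Int) : List Int × Option Int × Int :=
  if st.2.2 ≠ 0 ∧ st.2.1 = some x then (st.1, st.2.1, st.2.2 + 1)
  else ((if st.2.2 ≠ 0 then st.1 ++ [st.2.2] else st.1), some x, 1)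

def sumHighestAndLowestFrequency_alt (nums : List Int) : Int :=
  let st := (PySem.List.sorted nums (fun x => x) false).foldl pvStepB ([], none, 0)
  let counts0 := if st.2.2 ≠ 0 then st.1 ++ [st.2.2] else st.1
  let counts := PySem.List.sorted counts0 (fun x => x) false
  PySem.List.pyGetD counts 0 0 + PySem.List.pyGetD counts (-1) 0

-- ===== PRECONDITION & SPEC =====
-- A raises IndexError on the empty list (res[0]); Pre_ excludes exactly that input.
def Pre_sumHighestAndLowestFrequency (nums : List Int) : Prop := nums ≠ []
instance (nums : List Int) : Decidable (Pre_sumHighestAndLowestFrequency nums) := by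
  unfold Pre_sumHighestAndLowestFrequency; infer_instance
def pvWitness_sumHighestAndLowestFrequency : List Int := [1, 2, 2]

def Spec_sumHighestAndLowestFrequency (nums : List Int) (out : Int) : Prop :=
  out = sumHighestAndLowestFrequency_alt nums
instance (nums : List Int) (out : Int) : Decidable (Spec_sumHighestAndLowestFrequency nums out) := by
  unfold Spec_sumHighestAndLowestFrequency; infer_instance

-- ===== CLAIM (what is proved, stated in full; the proofs are below) =====
def Claim_equal_sumHighestAndLowestFrequency : Prop :=
  ∀ (nums : List Int), Dom_sumHighestAndLowestFrequency nums →
    Pre_sumHighestAndLowestFrequency nums →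
      Spec_sumHighestAndLowestFrequency nums (sumHighestAndLowestFrequency nums)

-- ===== LEMMAS AND PROOFS =====

-- ---- proof-side description of B's scan: run lengths of a list ----
def pvLead (x : Int) : List Int → Nat
  | [] => 0
  | y :: t => if y = x then pvLead x t + 1 else 0

def pvRuns : List Int → List Int
  | [] => []
  | x :: t => ((pvLead x t : Int) + 1) :: pvRuns (t.drop (pvLead x t))
termination_by s => s.length
decreasing_by simp [List.length_drop]

-- in a sorted tail the leading equal-run carries all the copies of x
theorem pvLead_split (x : Int) (t : List Int) (h1 : ∀ z ∈ t, x ≤ z)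
    (h2 : t.Pairwise (· ≤ ·)) :
    t.take (pvLead x t) = List.replicate (pvLead x t) x ∧ x ∉ t.drop (pvLead x t) := by
  induction t with
  | nil => simp [pvLead]
  | cons y t' ih =>
    rcases List.pairwise_cons.mp h2 with ⟨hy, ht'⟩
    by_cases hxy : y = x
    · subst hxy
      have := ih (fun z hz => h1 z (List.mem_cons_of_mem _ hz)) ht'
      simp [pvLead, List.replicate_succ, this.1, this.2]
    · have hlt : x < y := lt_of_le_of_ne (h1 y (List.mem_cons_self)) (fun h => hxy h.symm)
      constructor
      · simp [pvLead, hxy]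
      · simp only [pvLead, hxy, if_false, List.drop_zero]
        intro hmem
        rcases List.mem_cons.mp hmem with h | h
        · exact hxy h.symm
        · exact absurd (lt_of_lt_of_le hlt (hy x h)) (lt_irrefl x)

-- run lengths of a sorted list are (a permutation of) the per-distinct-value counts
theorem pvRuns_perm (s : List Int) (hs : s.Pairwise (· ≤ ·)) :
    (pvRuns s).Perm ((PySem.Set.ofList s).map (fun v => (s.count v : Int))) := by
  induction s using pvRuns.induct with
  | case1 => simp [pvRuns]
  | case2 x t ih =>
    rcases List.pairwise_cons.mp hs with ⟨hx, ht⟩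
    set k := pvLead x t with hk
    set r := t.drop k with hr
    have hsplit := pvLead_split x t hx ht
    have htk : t = List.replicate k x ++ r := by
      conv_lhs => rw [← List.take_append_drop k t]
      rw [hsplit.1]
    have hxr : x ∉ r := hsplit.2
    have hrpw : r.Pairwise (· ≤ ·) := ht.sublist (List.drop_sublist _ _)
    have hcx : (x :: t).count x = k + 1 := by
      rw [htk]
      simp [List.count_append, List.count_eq_zero.mpr hxr]
    have hcv : ∀ v, v ≠ x → (x :: t).count v = r.count v := by
      intro v hv
      have hxv : x ≠ v := fun h => hv h.symm
      rw [htk]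
      simp [List.count_append, List.count_replicate, hxv]
    have hmem : ∀ z, (z = x ∨ z ∈ r) ↔ (z = x ∨ z ∈ t) := by
      intro z
      constructor
      · rintro (rfl | h)
        · exact Or.inl rfl
        · exact Or.inr (htk ▸ List.mem_append_right _ h)
      · rintro (rfl | h)
        · exact Or.inl rfl
        · rw [htk] at h
          rcases List.mem_append.mp h with h | h
          · exact Or.inl (List.eq_of_mem_replicate h)
          · exact Or.inr h
    have hperm : (x :: PySem.Set.ofList r).Perm (PySem.Set.ofList (x :: t)) := by
      rw [List.perm_ext_iff_of_nodup
        (List.nodup_cons.mpr ⟨by simp [PySem.Set.mem_ofList, hxr], PySem.Set.nodup_ofList r⟩)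
        (PySem.Set.nodup_ofList _)]
      intro a
      simp only [List.mem_cons, PySem.Set.mem_ofList]
      exact hmem a
    have hstep : pvRuns (x :: t) = ((k : Int) + 1) :: pvRuns r := by
      rw [pvRuns]
    rw [hstep]
    refine ((ih hrpw).cons _).trans (List.Perm.trans ?_ (hperm.map _))
    have hhead : ((x :: t).count x : Int) = (k : Int) + 1 := by rw [hcx]; push_cast; ring
    have htail : (PySem.Set.ofList r).map (fun v => (r.count v : Int))
        = (PySem.Set.ofList r).map (fun v => ((x :: t).count v : Int)) := by
      apply List.map_congr_left
      intro v hv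
      have hvr : v ∈ r := (PySem.Set.mem_ofList _ _).mp hv
      have : v ≠ x := fun h => hxr (h ▸ hvr)
      rw [hcv v this]
    rw [List.map_cons, hhead, htail]

-- the scan computes pvRuns
theorem pvFold_runs_aux (s : List Int) :
    ∀ counts x (run : Int), s.Pairwise (· ≤ ·) → 0 < run → (∀ z ∈ s, x ≤ z) →
      (if (s.foldl pvStepB (counts, some x, run)).2.2 ≠ 0
         then (s.foldl pvStepB (counts, some x, run)).1 ++ [(s.foldl pvStepB (counts, some x, run)).2.2]
         else (s.foldl pvStepB (counts, some x, run)).1)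
      = counts ++ ((run + pvLead x s) :: pvRuns (s.drop (pvLead x s))) := by
  induction s with
  | nil =>
    intro counts x run _ hrun _
    simp [pvLead, pvRuns, hrun.ne']
  | cons y t ih =>
    intro counts x run hs hrun hle
    rcases List.pairwise_cons.mp hs with ⟨hy, ht⟩
    by_cases hxy : y = x
    · subst hxy
      have hstep : pvStepB (counts, some y, run) y = (counts, some y, run + 1) := by
        simp [pvStepB, hrun.ne']
      simp only [List.foldl_cons, hstep]
      rw [ih counts y (run + 1) ht (by omega)
        (fun z hz => hle z (List.mem_cons_of_mem _ hz))]
      have : run + 1 + (pvLead y t : Int) = run + ((pvLead y (y :: t) : Int)) := by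
        simp [pvLead]; ring
      rw [this]
      congr 2
      simp [pvLead]
    · have hne : x ≠ y := fun h => hxy h.symm
      have hstep : pvStepB (counts, some x, run) y = (counts ++ [run], some y, 1) := by
        simp [pvStepB, hrun.ne', hne]
      simp only [List.foldl_cons, hstep]
      rw [ih (counts ++ [run]) y 1 ht one_pos hy]
      have h0 : pvLead x (y :: t) = 0 := by simp [pvLead, hxy]
      rw [h0]
      simp only [List.drop_zero, List.append_assoc, List.cons_append, List.nil_append]
      rw [pvRuns, add_comm (1 : Int) (pvLead y t : Int)]
      norm_num

theorem pvFold_runs (s : List Int) (hs : s.Pairwise (· ≤ ·)) :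
    (if (s.foldl pvStepB ([], none, 0)).2.2 ≠ 0
       then (s.foldl pvStepB ([], none, 0)).1 ++ [(s.foldl pvStepB ([], none, 0)).2.2]
       else (s.foldl pvStepB ([], none, 0)).1) = pvRuns s := by
  cases s with
  | nil => simp [pvRuns]
  | cons y t =>
    rcases List.pairwise_cons.mp hs with ⟨hy, ht⟩
    have hstep : pvStepB ([], none, (0 : Int)) y = ([], some y, 1) := by
      simp [pvStepB]
    simp only [List.foldl_cons, hstep]
    rw [pvFold_runs_aux t [] y 1 ht one_pos hy]
    rw [pvRuns, add_comm (1 : Int) (pvLead y t : Int)]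
    simp only [List.nil_append]

-- A's if/else counting step is pointwise the insert-getD counting step.
theorem pvFoldFunEq :
    (fun (d : PySem.Dict Int Int) i =>
        if d.contains i then d.insert i (d.getD i 0 + 1) else d.insert i 1)
      = (fun d i => d.insert i (d.getD i 0 + 1)) := by
  funext d i
  by_cases h : d.contains i = true
  · simp [h]
  · simp only [Bool.not_eq_true] at h
    rw [PySem.Dict.getD_of_not_contains (h := h)]; simp [h]

-- A's dict's value list is the per-distinct-value count list.
theorem pvValuesEq (nums : List Int) :
    (nums.foldl
      (fun d i => if d.contains i then d.insert i (d.getD i 0 + 1) else d.insert i 1)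
      (PySem.Dict.empty : PySem.Dict Int Int)).values
    = (PySem.Set.ofList nums).map (fun v => (nums.count v : Int)) := by
  rw [pvFoldFunEq, PySem.Dict.foldl_insert_getD_add_one_eq_counter]
  show (PySem.Dict.counter nums).items.map (·.2) = _
  rw [PySem.Dict.items_counter]
  simp

-- ===== VERDICT (by name: the statement is the Claim_ definition above) =====
theorem sumHighestAndLowestFrequency_spec : Claim_equal_sumHighestAndLowestFrequency := by
  intro nums _ _
  show sumHighestAndLowestFrequency nums = sumHighestAndLowestFrequency_alt nums
  have hs : (PySem.List.sorted nums (fun x => x) false).Pairwise (· ≤ ·) := by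
    simpa using PySem.List.sorted_pairwise (xs := nums) (key := fun x => x)
  have hsp : (PySem.List.sorted nums (fun x => x) false).Perm nums :=
    PySem.List.sorted_perm nums (fun x => x) false
  have hof : (PySem.Set.ofList (PySem.List.sorted nums (fun x => x) false)).Perm
      (PySem.Set.ofList nums) := by
    rw [List.perm_ext_iff_of_nodup (PySem.Set.nodup_ofList _) (PySem.Set.nodup_ofList _)]
    intro a
    simp only [PySem.Set.mem_ofList]
    exact hsp.mem_iff
  have hperm : (pvRuns (PySem.List.sorted nums (fun x => x) false)).Perm
      ((PySem.Set.ofList nums).map (fun v => (nums.count v : Int))) := by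
    refine (pvRuns_perm _ hs).trans ?_
    have hcnt : (PySem.Set.ofList (PySem.List.sorted nums (fun x => x) false)).map
        (fun v => ((PySem.List.sorted nums (fun x => x) false).count v : Int))
        = (PySem.Set.ofList (PySem.List.sorted nums (fun x => x) false)).map
          (fun v => (nums.count v : Int)) := by
      apply List.map_congr_left
      intro v _
      rw [hsp.count_eq]
    rw [hcnt]
    exact hof.map _
  have hsorted : PySem.List.sorted (pvRuns (PySem.List.sorted nums (fun x => x) false))
      (fun x => x) false
      = PySem.List.sorted ((PySem.Set.ofList nums).map (fun v => (nums.count v : Int)))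
        (fun x => x) false :=
    (PySem.List.sorted_id_eq_sorted_id_iff_perm _ _).mpr hperm
  simp only [sumHighestAndLowestFrequency, sumHighestAndLowestFrequency_alt, pvValuesEq,
    pvFold_runs _ hs, hsorted]
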